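-- pv_equiv track=rewrite | github.com/UKPLab/germeval2017-sentiment-detection | mtl-sequence-tagging-framework/src/shared_modules/eval/argmin_components.py | getTP
-- ===== SOURCE A (Python) =====
-- def getTP(pred, truth):
--     TP = 0
--     FP = 0
--     FN = 0
--     for x in pred:
--         if x in truth:
--             if truth[x] == pred[x]:
--
--                 TP += 1
--             else:
--                 FP += 1
--         else:
--             FP += 1
--     for x in truth:
--         if x not in pred:
--             FN += 1
--         else:
--             if truth[x] != pred[x]:
--                 FN += 1
--     return TP, FP, FN
-- ===== SOURCE B (Python) =====
-- def getTP(pred, truth):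
--     tp = sum(1 for x in pred if x in truth and truth[x] == pred[x])
--     return tp, len(pred) - tp, len(truth) - tp
-- ===== Notes on version B (the rewrite author's own statement) =====
-- stated objective: simpler
-- what changed: Single pass counting TP only; FP and FN are recovered arithmetically as len(pred)-TP and len(truth)-TP, dropping A's second loop and its branch bookkeeping.
import Mathlib
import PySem

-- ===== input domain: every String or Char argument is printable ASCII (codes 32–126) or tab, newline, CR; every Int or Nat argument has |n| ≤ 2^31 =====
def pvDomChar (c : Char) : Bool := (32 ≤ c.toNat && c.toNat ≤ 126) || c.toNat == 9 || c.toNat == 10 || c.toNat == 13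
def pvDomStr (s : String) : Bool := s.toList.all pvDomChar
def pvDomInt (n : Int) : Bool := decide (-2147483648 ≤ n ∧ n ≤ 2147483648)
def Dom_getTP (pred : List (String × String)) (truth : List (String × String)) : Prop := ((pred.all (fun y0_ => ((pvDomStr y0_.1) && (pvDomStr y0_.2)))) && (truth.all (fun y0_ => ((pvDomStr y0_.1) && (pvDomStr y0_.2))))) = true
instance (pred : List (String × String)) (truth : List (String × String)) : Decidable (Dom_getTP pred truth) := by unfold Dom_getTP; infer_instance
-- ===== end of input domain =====

-- B replaces A's second loop by length arithmetic: one pass counts TP, then FP = len(pred) - TP and FN = len(truth) - TP (objective: simpler).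

-- ===== PORT A =====
-- dict lookup d[x] / membership 'x in d' ported via PySem.Dict.mk / get? (first match).
def getTP (pred : List (String × String)) (truth : List (String × String)) : Int × Int × Int :=
  let tpfp : Int × Int := pred.foldl (fun acc kv =>
    if ((PySem.Dict.mk truth).get? kv.1).isSome then
      if (PySem.Dict.mk truth).get? kv.1 = (PySem.Dict.mk pred).get? kv.1 then
        (acc.1 + 1, acc.2)
      else
        (acc.1, acc.2 + 1)
    else
      (acc.1, acc.2 + 1)) (0, 0)
  let fn : Int := truth.foldl (fun acc kv =>
    if ¬ ((PySem.Dict.mk pred).get? kv.1).isSome then acc + 1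
    else if (PySem.Dict.mk truth).get? kv.1 ≠ (PySem.Dict.mk pred).get? kv.1 then acc + 1
    else acc) 0
  (tpfp.1, tpfp.2, fn)

-- ===== PORT B =====
def getTP_alt (pred : List (String × String)) (truth : List (String × String)) : Int × Int × Int :=
  let tp : Int := (pred.countP (fun kv =>
    ((PySem.Dict.mk truth).get? kv.1).isSome &&
    ((PySem.Dict.mk truth).get? kv.1 == (PySem.Dict.mk pred).get? kv.1)) : Nat)
  (tp, (pred.length : Int) - tp, (truth.length : Int) - tp)

-- ===== PRECONDITION & SPEC =====
-- Pre_ excludes association lists with duplicate keys: the Python arguments are dicts, whose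
-- keys are necessarily distinct, so duplicate-key lists represent no Python input of A.
def Pre_getTP (pred : List (String × String)) (truth : List (String × String)) : Prop :=
  (pred.map Prod.fst).Nodup ∧ (truth.map Prod.fst).Nodup
instance (pred : List (String × String)) (truth : List (String × String)) : Decidable (Pre_getTP pred truth) := by unfold Pre_getTP; infer_instance

def pvWitness_getTP : (List (String × String)) × (List (String × String)) :=
  ([("a", "1"), ("b", "2")], [("a", "1"), ("c", "3")])

def Spec_getTP (pred : List (String × String)) (truth : List (String × String)) (out : Int × Int × Int) : Prop := out = getTP_alt pred truth
instance (pred : List (String × String)) (truth : List (String × String)) (out : Int × Int × Int) : Decidable (Spec_getTP pred truth out) := by unfold Spec_getTP; infer_instance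

-- ===== CLAIM (what is proved, stated in full; the proofs are below) =====
def Claim_equal_getTP : Prop := ∀ (pred : List (String × String)) (truth : List (String × String)), Dom_getTP pred truth → Pre_getTP pred truth → Spec_getTP pred truth (getTP pred truth)

-- ===== LEMMAS AND PROOFS =====

-- A's first loop: each step increments exactly one of (TP, FP).
theorem pv_fold1 {α : Type} (c : α → Bool) (l : List α) (a b : Int) :
    l.foldl (fun acc kv => if c kv then (acc.1 + 1, acc.2) else (acc.1, acc.2 + 1)) (a, b)
      = (a + (l.countP c : Int), b + ((l.length : Int) - (l.countP c : Int))) := by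
  induction l generalizing a b with
  | nil => simp
  | cons x xs ih =>
    cases h : c x with
    | true =>
      simp only [List.foldl_cons, List.countP_cons, List.length_cons, h, if_true]
      rw [ih]
      simp only [Prod.mk.injEq]
      constructor <;> push_cast <;> ring
    | false =>
      simp only [List.foldl_cons, List.countP_cons, List.length_cons, h,
        Bool.false_eq_true, if_false]
      rw [ih]
      simp only [Prod.mk.injEq]
      constructor <;> push_cast <;> ring

-- A's second loop: FN counts the entries failing the (present ∧ equal) test.
theorem pv_fold2 {α : Type} (c : α → Bool) (l : List α) (a : Int) :
    l.foldl (fun acc kv => if c kv then acc else acc + 1) a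
      = a + ((l.length : Int) - (l.countP c : Int)) := by
  induction l generalizing a with
  | nil => simp
  | cons x xs ih =>
    cases h : c x with
    | true =>
      simp only [List.foldl_cons, List.countP_cons, List.length_cons, h, if_true]
      rw [ih]; push_cast; ring
    | false =>
      simp only [List.foldl_cons, List.countP_cons, List.length_cons, h,
        Bool.false_eq_true, if_false]
      rw [ih]; push_cast; ring

-- get? on a raw list is some iff the key occurs.
theorem pv_get?_isSome (l : List (String × String)) (k : String) :
    ((PySem.Dict.mk l).get? k).isSome = true ↔ k ∈ l.map Prod.fst := by
  induction l with
  | nil => simp [PySem.Dict.get?]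
  | cons p rest ih =>
    rw [show (p = (p.1, p.2)) from rfl, PySem.Dict.get?_mk_cons]
    by_cases h : p.1 = k
    · simp [h]
    · simp [beq_iff_eq, h, ih, Ne.symm h]

-- The symmetric key condition both counts reduce to.
def pvR (pred truth : List (String × String)) (k : String) : Bool :=
  ((PySem.Dict.mk truth).get? k == (PySem.Dict.mk pred).get? k) &&
  ((PySem.Dict.mk pred).get? k).isSome

theorem pv_predside_eq_R (pred truth : List (String × String)) (k : String)
    (hk : k ∈ pred.map Prod.fst) :
    (((PySem.Dict.mk truth).get? k).isSome &&
      ((PySem.Dict.mk truth).get? k == (PySem.Dict.mk pred).get? k)) = pvR pred truth k := by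
  have hp : ((PySem.Dict.mk pred).get? k).isSome = true := (pv_get?_isSome pred k).mpr hk
  unfold pvR
  cases ht : (PySem.Dict.mk truth).get? k <;>
    cases hpv : (PySem.Dict.mk pred).get? k <;> simp_all

theorem pv_truthside_eq_R (pred truth : List (String × String)) (k : String)
    (_hk : k ∈ truth.map Prod.fst) :
    (((PySem.Dict.mk pred).get? k).isSome &&
      decide ((PySem.Dict.mk truth).get? k = (PySem.Dict.mk pred).get? k)) = pvR pred truth k := by
  unfold pvR
  cases ht : (PySem.Dict.mk truth).get? k <;>
    cases hpv : (PySem.Dict.mk pred).get? k <;> simp_all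
  rename_i v w
  by_cases hv : v = w <;> simp [hv]

-- Counting pvR over pred's keys equals counting it over truth's keys (both sides count
-- exactly the keys present in both dicts with equal values).
theorem pv_count_R_eq (pred truth : List (String × String))
    (hp : (pred.map Prod.fst).Nodup) (ht : (truth.map Prod.fst).Nodup) :
    (pred.map Prod.fst).countP (pvR pred truth) = (truth.map Prod.fst).countP (pvR pred truth) := by
  have hperm : List.Perm ((pred.map Prod.fst).filter (pvR pred truth))
      ((truth.map Prod.fst).filter (pvR pred truth)) := by
    apply (List.perm_ext_iff_of_nodup (hp.filter _) (ht.filter _)).mpr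
    intro k
    simp only [List.mem_filter]
    constructor
    · rintro ⟨-, hR⟩
      refine ⟨?_, hR⟩
      have h1 : (((PySem.Dict.mk truth).get? k == (PySem.Dict.mk pred).get? k) = true)
          ∧ ((PySem.Dict.mk pred).get? k).isSome = true := by
        simpa [pvR] using hR
      have : ((PySem.Dict.mk truth).get? k).isSome = true := by
        rcases h1 with ⟨heq, hsome⟩
        rw [beq_iff_eq] at heq
        rw [heq]; exact hsome
      exact (pv_get?_isSome truth k).mp this
    · rintro ⟨-, hR⟩
      refine ⟨?_, hR⟩
      have hsome : ((PySem.Dict.mk pred).get? k).isSome = true := by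
        have := hR; unfold pvR at this
        exact (Bool.and_eq_true _ _ |>.mp this).2
      exact (pv_get?_isSome pred k).mp hsome
  calc (pred.map Prod.fst).countP (pvR pred truth)
      = ((pred.map Prod.fst).filter (pvR pred truth)).length := List.countP_eq_length_filter
    _ = ((truth.map Prod.fst).filter (pvR pred truth)).length := hperm.length_eq
    _ = (truth.map Prod.fst).countP (pvR pred truth) := List.countP_eq_length_filter.symm

theorem pv_countP_congr_mem {α : Type} (l : List α) (p q : α → Bool)
    (h : ∀ x ∈ l, p x = q x) : l.countP p = l.countP q := by
  induction l with
  | nil => rfl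
  | cons x xs ih =>
    simp only [List.countP_cons, h x (List.mem_cons_self), ih (fun y hy => h y (List.mem_cons_of_mem _ hy))]

-- ===== VERDICT (by name: the statement is the Claim_ definition above) =====
theorem getTP_spec : Claim_equal_getTP := by
  intro pred truth _ hpre
  obtain ⟨hp, ht⟩ := hpre
  unfold Spec_getTP getTP getTP_alt
  -- the common TP predicate of B
  set P : String × String → Bool := fun kv =>
    ((PySem.Dict.mk truth).get? kv.1).isSome &&
    ((PySem.Dict.mk truth).get? kv.1 == (PySem.Dict.mk pred).get? kv.1) with hP
  -- first loop of A is the step-shape of pv_fold1 with condition P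
  have h1 : pred.foldl (fun acc kv =>
      if ((PySem.Dict.mk truth).get? kv.1).isSome then
        if (PySem.Dict.mk truth).get? kv.1 = (PySem.Dict.mk pred).get? kv.1 then
          (acc.1 + 1, acc.2)
        else (acc.1, acc.2 + 1)
      else (acc.1, acc.2 + 1)) ((0 : Int), (0 : Int))
      = ((pred.countP P : Int), ((pred.length : Int) - (pred.countP P : Int))) := by
    have hstep : (fun (acc : Int × Int) (kv : String × String) =>
        if ((PySem.Dict.mk truth).get? kv.1).isSome then
          if (PySem.Dict.mk truth).get? kv.1 = (PySem.Dict.mk pred).get? kv.1 then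
            (acc.1 + 1, acc.2)
          else (acc.1, acc.2 + 1)
        else (acc.1, acc.2 + 1))
        = (fun (acc : Int × Int) kv => if P kv then (acc.1 + 1, acc.2) else (acc.1, acc.2 + 1)) := by
      funext acc kv
      rw [hP]
      by_cases hs : ((PySem.Dict.mk truth).get? kv.1).isSome = true <;>
        by_cases he : (PySem.Dict.mk truth).get? kv.1 = (PySem.Dict.mk pred).get? kv.1 <;>
          simp [hs, he]
    rw [hstep, pv_fold1]
    simp
  -- second loop of A counts the complement of the symmetric condition on truth
  have h2 : truth.foldl (fun acc kv =>
      if ¬ ((PySem.Dict.mk pred).get? kv.1).isSome then acc + 1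
      else if (PySem.Dict.mk truth).get? kv.1 ≠ (PySem.Dict.mk pred).get? kv.1 then acc + 1
      else acc) (0 : Int)
      = (truth.length : Int) - (truth.countP (fun kv => pvR pred truth kv.1) : Int) := by
    have hstep : (fun (acc : Int) (kv : String × String) =>
        if ¬ ((PySem.Dict.mk pred).get? kv.1).isSome then acc + 1
        else if (PySem.Dict.mk truth).get? kv.1 ≠ (PySem.Dict.mk pred).get? kv.1 then acc + 1
        else acc)
        = (fun (acc : Int) kv =>
            if (((PySem.Dict.mk pred).get? kv.1).isSome &&
              decide ((PySem.Dict.mk truth).get? kv.1 = (PySem.Dict.mk pred).get? kv.1)) then acc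
            else acc + 1) := by
      funext acc kv
      by_cases hs : ((PySem.Dict.mk pred).get? kv.1).isSome = true <;>
        by_cases he : (PySem.Dict.mk truth).get? kv.1 = (PySem.Dict.mk pred).get? kv.1 <;>
          simp [hs, he]
    rw [hstep, pv_fold2]
    have : truth.countP (fun kv => (((PySem.Dict.mk pred).get? kv.1).isSome &&
        decide ((PySem.Dict.mk truth).get? kv.1 = (PySem.Dict.mk pred).get? kv.1)))
        = truth.countP (fun kv => pvR pred truth kv.1) :=
      pv_countP_congr_mem _ _ _ (fun kv hkv =>
        pv_truthside_eq_R pred truth kv.1 (List.mem_map_of_mem hkv))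
    rw [this]; ring
  -- the two counts agree via the symmetric key condition
  have hcount : pred.countP P = truth.countP (fun kv => pvR pred truth kv.1) := by
    have hpred : pred.countP P = pred.countP (fun kv => pvR pred truth kv.1) :=
      pv_countP_congr_mem _ _ _ (fun kv hkv => by
        rw [hP]; exact pv_predside_eq_R pred truth kv.1 (List.mem_map_of_mem hkv))
    have hmapP : pred.countP (fun kv => pvR pred truth kv.1)
        = (pred.map Prod.fst).countP (pvR pred truth) := by
      rw [List.countP_map]; rfl
    have hmapT : truth.countP (fun kv => pvR pred truth kv.1)
        = (truth.map Prod.fst).countP (pvR pred truth) := by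
      rw [List.countP_map]; rfl
    rw [hpred, hmapP, hmapT, pv_count_R_eq pred truth hp ht]
  simp only [h1, h2, hcount]
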